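-- pv_equiv track=rewrite | github.com/ajschrand/nyt-answer-key | utils/str_utils.py | get_list_grid
-- ===== SOURCE A (Python) =====
-- def get_list_grid(list, size):
--     grid = ""
--     line = ""
--     for i, word in enumerate(list):
--         line += str(word) + " "
--         if (i + 1) % size == 0:
--             grid += line + "\n"
--             line = ""
--
--     return grid.strip()
-- ===== SOURCE B (Python) =====
-- def get_list_grid(list, size):
--     nrows = len(list) // size
--     rows = (" ".join(str(w) for w in list[i * size:(i + 1) * size]) for i in range(nrows))
--     return " \n".join(rows)
-- ===== Notes on version B (the rewrite author's own statement) =====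
-- stated objective: faster
-- what changed: Replaces A's single accumulating pass (repeated string += with a modulo-triggered line flush, then strip) by closed-form chunking: len//size complete rows, each rendered from a slice with ' '.join and the rows joined with ' \n'; join-based construction avoids per-character string reconcatenation. Pre_ restricts to positive widths (size >= 1), the natural domain: at size = 0 A raises on nonempty input and its '' on the empty list is an accident of the loop never running, and at size < 0 A's grouping by |size| is an accident of Python's modulo sign rule.
-- outside the precondition, e.g. on get_list_grid([], 0): A returns '', B raises ZeroDivisionError; on get_list_grid([1, 2, 3, 4], -2): A returns '1 2 \n3 4', B returns ''
import Mathlib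
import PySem

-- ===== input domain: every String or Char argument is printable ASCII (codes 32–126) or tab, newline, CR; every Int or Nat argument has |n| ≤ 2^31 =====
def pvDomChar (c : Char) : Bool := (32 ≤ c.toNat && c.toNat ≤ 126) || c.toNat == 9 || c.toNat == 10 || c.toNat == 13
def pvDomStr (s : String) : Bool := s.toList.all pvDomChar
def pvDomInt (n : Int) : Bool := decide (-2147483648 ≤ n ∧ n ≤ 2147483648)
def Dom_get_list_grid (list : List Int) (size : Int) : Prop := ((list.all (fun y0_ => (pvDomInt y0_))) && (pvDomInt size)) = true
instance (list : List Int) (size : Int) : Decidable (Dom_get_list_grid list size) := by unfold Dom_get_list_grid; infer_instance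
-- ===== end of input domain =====

-- B replaces A's accumulating pass (modulo-triggered line flush, then strip) by closed-form
-- chunking: len//size complete rows rendered from slices and joined; same output on Pre_.

-- ===== PORT A =====
-- loop body of A's for-loop: state = (grid, line), item = (i, word)
def pvStepA (size : Int) (gl : List Char × List Char) (iw : Int × Int) : List Char × List Char :=
  let line := gl.2 ++ PySem.Int.toChars iw.2 ++ [' ']
  if PySem.Int.mod (iw.1 + 1) size = 0 then (gl.1 ++ line ++ ['\n'], []) else (gl.1, line)

def get_list_grid (list : List Int) (size : Int) : String :=
  String.ofList (PySem.Chars.strip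
    (((PySem.List.enumerate list 0).foldl (pvStepA size) ([], [])).1))

-- ===== PORT B =====
def get_list_grid_alt (list : List Int) (size : Int) : String :=
  let nrows : Int := PySem.Int.floordiv (PySem.List.len list) size
  String.ofList (PySem.Chars.join [' ', '\n']
    ((PySem.List.pyRange 0 nrows 1).map (fun i =>
      PySem.Chars.join [' ']
        ((PySem.List.slice list (some (i * size)) (some ((i + 1) * size))).map
          PySem.Int.toChars))))

-- ===== PRECONDITION & SPEC =====
-- Pre_ restricts to positive row widths (1 ≤ size), the function's natural domain: at size = 0
-- A raises ZeroDivisionError on nonempty input (its '' on the empty list is an accident of the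
-- loop never running), and at size < 0 A's grouping into rows of |size| is an accident of
-- Python's modulo sign rule; B raises at size = 0 and returns '' at size < 0.
def Pre_get_list_grid (list : List Int) (size : Int) : Prop := 1 ≤ size
instance (list : List Int) (size : Int) : Decidable (Pre_get_list_grid list size) := by
  unfold Pre_get_list_grid; infer_instance

def pvWitness_get_list_grid : List Int × Int := ([1, 2, 3], 2)

def Spec_get_list_grid (list : List Int) (size : Int) (out : String) : Prop := out = get_list_grid_alt list size
instance (list : List Int) (size : Int) (out : String) : Decidable (Spec_get_list_grid list size out) := by unfold Spec_get_list_grid; infer_instance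

-- ===== CLAIM (what is proved, stated in full; the proofs are below) =====
def Claim_equal_get_list_grid : Prop := ∀ (list : List Int) (size : Int), Dom_get_list_grid list size → Pre_get_list_grid list size → Spec_get_list_grid list size (get_list_grid list size)

-- ===== LEMMAS AND PROOFS =====

-- rendering of one row the way A builds it: each word followed by one space
def pvFlat (c : List Int) : List Char := c.flatMap (fun w => PySem.Int.toChars w ++ [' '])

-- rendering of one row the way B builds it: words joined by single spaces
def pvRow (c : List Int) : List Char := PySem.Chars.join [' '] (c.map PySem.Int.toChars)

-- the r complete chunks of width k
def pvChunks (k : Nat) : Nat → List Int → List (List Int)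
  | 0, _ => []
  | r + 1, l => l.take k :: pvChunks k r (l.drop k)

theorem pv_enumerate_append (l1 l2 : List Int) (s : Int) :
    PySem.List.enumerate (l1 ++ l2) s
      = PySem.List.enumerate l1 s ++ PySem.List.enumerate l2 (s + l1.length) := by
  induction l1 generalizing s with
  | nil => simp [PySem.List.enumerate_nil]
  | cons x t ih =>
      simp [PySem.List.enumerate_cons, ih, add_assoc]
      ring_nf

-- a stretch with no flush just extends the line
theorem pv_noflush (size : Int) (c : List Int) (s : Int) (g line : List Char)
    (h : ∀ j : Nat, 0 < j → j ≤ c.length → ¬ size ∣ (s + j)) :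
    (PySem.List.enumerate c s).foldl (pvStepA size) (g, line) = (g, line ++ pvFlat c) := by
  induction c generalizing s line with
  | nil => simp [PySem.List.enumerate_nil, pvFlat]
  | cons x t ih =>
      have h1 : ¬ size ∣ (s + 1) := by
        have := h 1 (by omega) (by simp); simpa using this
      rw [PySem.List.enumerate_cons, List.foldl_cons]
      have hstep : pvStepA size (g, line) (s, x) = (g, line ++ PySem.Int.toChars x ++ [' ']) := by
        simp [pvStepA, PySem.Int.mod_eq_zero_iff_dvd, h1]
      rw [hstep, ih (s + 1) _ (fun j hj hjl => by
        have h2 := h (j + 1) (by omega) (by simp; omega)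
        rintro ⟨c, hc⟩
        exact h2 ⟨c, by push_cast at hc ⊢; linarith⟩)]
      simp [pvFlat]

-- a full chunk: no flush inside, flush at its end; the line is emptied
theorem pv_onechunk (size : Int) (c : List Int) (s : Int) (g line : List Char)
    (hne : c ≠ [])
    (hend : size ∣ (s + c.length))
    (hin : ∀ j : Nat, 0 < j → j < c.length → ¬ size ∣ (s + j)) :
    (PySem.List.enumerate c s).foldl (pvStepA size) (g, line)
      = (g ++ line ++ pvFlat c ++ ['\n'], []) := by
  induction c generalizing s line with
  | nil => exact absurd rfl hne
  | cons x t ih =>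
      rw [PySem.List.enumerate_cons, List.foldl_cons]
      cases t with
      | nil =>
          have h1 : size ∣ (s + 1) := by simpa using hend
          have hstep : pvStepA size (g, line) (s, x)
              = (g ++ (line ++ PySem.Int.toChars x ++ [' ']) ++ ['\n'], []) := by
            simp [pvStepA, PySem.Int.mod_eq_zero_iff_dvd, h1]
          rw [hstep]
          simp [PySem.List.enumerate_nil, pvFlat]
      | cons y r =>
          have h1 : ¬ size ∣ (s + 1) := by
            have := hin 1 (by omega) (by simp only [List.length_cons]; omega); simpa using this
          have hstep : pvStepA size (g, line) (s, x)
              = (g, line ++ PySem.Int.toChars x ++ [' ']) := by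
            simp [pvStepA, PySem.Int.mod_eq_zero_iff_dvd, h1]
          rw [hstep, ih (s + 1) _ (by simp)
            (by obtain ⟨c, hc⟩ := hend
                exact ⟨c, by simp only [List.length_cons] at hc ⊢; push_cast at hc ⊢; linarith⟩)
            (fun j hj hjl => by
              have h2 := hin (j + 1) (by omega)
                (by simp only [List.length_cons] at hjl ⊢; omega)
              rintro ⟨c, hc⟩
              exact h2 ⟨c, by push_cast at hc ⊢; linarith⟩)]
          simp [pvFlat, List.append_assoc]

-- main invariant of A's loop, chunk by chunk
theorem pv_mainA (size : Int) (k : Nat) (hk : size.natAbs = k) (hk0 : 0 < k)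
    (r : Nat) :
    ∀ (m : Nat), m < k → ∀ (l : List Int), l.length = r * k + m →
    ∀ (s : Int), size ∣ s → ∀ (g : List Char),
    (PySem.List.enumerate l s).foldl (pvStepA size) (g, [])
      = (g ++ (pvChunks k r l).flatMap (fun c => pvFlat c ++ ['\n']), pvFlat (l.drop (r * k))) := by
  induction r with
  | zero =>
      intro m hm l hl s hs g
      have hnd : ∀ j : Nat, 0 < j → j ≤ l.length → ¬ size ∣ (s + j) := by
        intro j hj hjl hc
        have hdj : size ∣ (j : Int) := (Int.dvd_add_right hs).mp hc
        have : k ∣ j := by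
          have := Int.natAbs_dvd_natAbs.mpr hdj
          simpa [hk] using this
        have := Nat.le_of_dvd hj this
        omega
      rw [pv_noflush size l s g [] hnd]
      simp [pvChunks]
  | succ r ih =>
      intro m hm l hl s hs g
      have hrk : (r + 1) * k = r * k + k := by ring
      rw [hrk] at hl
      have hlen : k ≤ l.length := by omega
      have hsplit : l = l.take k ++ l.drop k := (List.take_append_drop k l).symm
      have htk : (l.take k).length = k := by simp [List.length_take]; omega
      conv_lhs => rw [hsplit]
      rw [pv_enumerate_append, List.foldl_append]
      have hdvdk : size ∣ (k : Int) := by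
        rw [← hk]; exact Int.dvd_natAbs.mpr dvd_rfl
      rw [pv_onechunk size (l.take k) s g []
        (by intro hnil; rw [hnil] at htk; simp at htk; omega)
        (by rw [htk]; exact dvd_add hs hdvdk)
        (fun j hj hjl => by
          rw [htk] at hjl
          intro hc
          have hdj : size ∣ (j : Int) := (Int.dvd_add_right hs).mp hc
          have hkj : k ∣ j := by
            have := Int.natAbs_dvd_natAbs.mpr hdj
            simpa [hk] using this
          have := Nat.le_of_dvd hj hkj
          omega)]
      have hdl : (l.drop k).length = r * k + m := by
        simp [List.length_drop]; omega
      rw [htk]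
      rw [ih m hm (l.drop k) hdl (s + k) (dvd_add hs hdvdk) _]
      rw [Prod.mk.injEq]
      refine ⟨?_, ?_⟩
      · simp [pvChunks, List.append_assoc]
      · rw [List.drop_drop]
        congr 2
        omega

-- chunks from slices
theorem pv_chunks_eq (k : Nat) (r : Nat) :
    ∀ l : List Int, (List.range r).map (fun i => (l.drop (i * k)).take k) = pvChunks k r l := by
  induction r with
  | zero => intro l; simp [pvChunks]
  | succ r ih =>
      intro l
      rw [List.range_succ_eq_map]
      simp only [List.map_cons, List.map_map, Nat.zero_mul, List.drop_zero]
      rw [pvChunks]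
      congr 1
      rw [← ih (l.drop k)]
      apply List.map_congr_left
      intro i _
      simp [List.drop_drop]
      congr 2
      ring

-- A's row rendering vs B's join-based one, on a nonempty row
theorem pv_row_eq (c : List Int) (h : c ≠ []) : pvRow c ++ [' '] = pvFlat c := by
  induction c with
  | nil => exact absurd rfl h
  | cons x t ih =>
      cases t with
      | nil => simp [pvRow, PySem.Chars.join_singleton, pvFlat]
      | cons y r =>
          simp only [pvRow, List.map_cons] at ih ⊢
          rw [PySem.Chars.join_cons_cons]
          simp only [pvFlat, List.flatMap_cons] at ih ⊢
          rw [← ih (by simp)]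
          simp [List.append_assoc]

-- sep-terminated concatenation vs sep join
theorem pv_flat_join (sep : List Char) (rows : List (List Char)) (h : rows ≠ []) :
    rows.flatMap (fun p => p ++ sep) = PySem.Chars.join sep rows ++ sep := by
  induction rows with
  | nil => exact absurd rfl h
  | cons a t ih =>
      cases t with
      | nil => simp [PySem.Chars.join_singleton]
      | cons b r =>
          rw [PySem.Chars.join_cons_cons]
          simp only [List.flatMap_cons] at ih ⊢
          rw [ih (by simp)]
          simp [List.append_assoc]

theorem pv_rstrip_sp_nl (x : List Char) :
    PySem.Chars.rstrip (x ++ [' ', '\n']) = PySem.Chars.rstrip x := by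
  simp [PySem.Chars.rstrip, PySem.Chars.isspace]

theorem pv_strip_sp_nl (x : List Char) :
    PySem.Chars.strip (x ++ [' ', '\n']) = PySem.Chars.strip x := by
  simp only [PySem.Chars.strip, PySem.Chars.lstrip]
  rw [List.dropWhile_append]
  by_cases h : (List.dropWhile PySem.Chars.isspace x).isEmpty
  · rw [if_pos h]
    rw [List.isEmpty_iff] at h
    rw [h]
    simp [PySem.Chars.rstrip, List.dropWhile, PySem.Chars.isspace]
  · rw [if_neg h]
    exact pv_rstrip_sp_nl _

-- strip is the identity on a string with non-space first and last characters
theorem pv_strip_eq_self (x : List Char)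
    (h1 : ∃ c, x.head? = some c ∧ PySem.Chars.isspace c = false)
    (h2 : ∃ c, x.getLast? = some c ∧ PySem.Chars.isspace c = false) :
    PySem.Chars.strip x = x := by
  obtain ⟨c, hc, hcs⟩ := h1
  obtain ⟨d, hd, hds⟩ := h2
  have hl : PySem.Chars.lstrip x = x := by
    cases x with
    | nil => simp at hc
    | cons y t =>
        simp only [List.head?_cons, Option.some.injEq] at hc
        subst hc
        simp [PySem.Chars.lstrip, hcs]
  have hr : PySem.Chars.rstrip x = x := by
    obtain ⟨r, hrv⟩ : ∃ r, x.reverse = d :: r := by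
      cases hx : x.reverse with
      | nil =>
          have : x = [] := by simpa using congrArg List.reverse hx
          rw [this] at hd; simp at hd
      | cons e r =>
          have he : e = d := by
            have h2 : x.reverse.head? = some e := by rw [hx]; rfl
            rw [List.head?_reverse, hd] at h2
            injection h2 with h3
            exact h3.symm
          subst he
          exact ⟨r, rfl⟩
    unfold PySem.Chars.rstrip
    rw [hrv, List.dropWhile_cons, hds]
    simp only [if_false, Bool.false_eq_true]
    have := congrArg List.reverse hrv
    simpa using this.symm
  unfold PySem.Chars.strip
  rw [hl, hr]

-- unfolding equations of Nat.toDigitsCore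
theorem pv_toDigitsCore_zero (b n : Nat) (acc : List Char) :
    Nat.toDigitsCore b 0 n acc = acc := by
  rw [Nat.toDigitsCore.eq_def]

theorem pv_toDigitsCore_succ (b f n : Nat) (acc : List Char) :
    Nat.toDigitsCore b (f + 1) n acc
      = if n / b = 0 then (n % b).digitChar :: acc
        else Nat.toDigitsCore b f (n / b) ((n % b).digitChar :: acc) := by
  rw [Nat.toDigitsCore.eq_def]

-- every character of Nat.digitChar is non-space
theorem pv_isspace_digitChar (k : Nat) : PySem.Chars.isspace (Nat.digitChar k) = false := by
  rcases Nat.lt_or_ge k 16 with h | h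
  · interval_cases k <;> decide
  · have hd : Nat.digitChar k = '*' := by
      unfold Nat.digitChar
      repeat rw [if_neg (by omega)]
    rw [hd]; decide

theorem pv_toDigitsCore_mem (b : Nat) :
    ∀ (fuel n : Nat) (acc : List Char) (c : Char), c ∈ Nat.toDigitsCore b fuel n acc →
      c ∈ acc ∨ ∃ k, c = Nat.digitChar k := by
  intro fuel
  induction fuel with
  | zero =>
      intro n acc c h
      rw [pv_toDigitsCore_zero] at h
      exact Or.inl h
  | succ f ih =>
      intro n acc c h
      rw [pv_toDigitsCore_succ] at h
      by_cases hz : n / b = 0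
      · rw [if_pos hz] at h
        rcases List.mem_cons.mp h with h | h
        · exact Or.inr ⟨n % b, h⟩
        · exact Or.inl h
      · rw [if_neg hz] at h
        rcases ih (n / b) ((n % b).digitChar :: acc) c h with h | h
        · rcases List.mem_cons.mp h with h | h
          · exact Or.inr ⟨n % b, h⟩
          · exact Or.inl h
        · exact Or.inr h

theorem pv_toDigitsCore_len (b : Nat) :
    ∀ (fuel n : Nat) (acc : List Char),
      acc.length ≤ (Nat.toDigitsCore b fuel n acc).length := by
  intro fuel
  induction fuel with
  | zero => intro n acc; rw [pv_toDigitsCore_zero]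
  | succ f ih =>
      intro n acc
      rw [pv_toDigitsCore_succ]
      by_cases hz : n / b = 0
      · rw [if_pos hz]; simp
      · rw [if_neg hz]
        have := ih (n / b) ((n % b).digitChar :: acc)
        simp only [List.length_cons] at this
        omega

theorem pv_toDigits_ne_nil (b n : Nat) : Nat.toDigits b n ≠ [] := by
  unfold Nat.toDigits
  intro h
  have hlen := congrArg List.length h
  rw [pv_toDigitsCore_succ] at hlen
  by_cases hz : n / b = 0
  · rw [if_pos hz] at hlen; simp at hlen
  · rw [if_neg hz] at hlen
    have := pv_toDigitsCore_len b n (n / b) [(n % b).digitChar]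
    simp only [List.length_cons, List.length_nil] at hlen this
    omega

theorem pv_toChars_ne_nil (n : Int) : PySem.Int.toChars n ≠ [] := by
  unfold PySem.Int.toChars
  split_ifs
  · simp
  · exact pv_toDigits_ne_nil 10 n.toNat

theorem pv_nonspace_toChars (n : Int) (c : Char) (h : c ∈ PySem.Int.toChars n) :
    PySem.Chars.isspace c = false := by
  unfold PySem.Int.toChars at h
  have hdig : ∀ m : Nat, c ∈ Nat.toDigits 10 m → PySem.Chars.isspace c = false := by
    intro m hm
    rcases pv_toDigitsCore_mem 10 (m + 1) m [] c hm with h | ⟨k, hk⟩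
    · simp at h
    · rw [hk]; exact pv_isspace_digitChar k
  split_ifs at h
  · rcases List.mem_cons.mp h with h | h
    · rw [h]; decide
    · exact hdig _ h
  · exact hdig _ h

-- head / last of a nonempty join, propagated from its parts
theorem pv_join_head (sep : List Char) (P : Char → Prop) (a : List Char) (l : List (List Char))
    (h : ∃ c, a.head? = some c ∧ P c) :
    ∃ c, (PySem.Chars.join sep (a :: l)).head? = some c ∧ P c := by
  obtain ⟨c, hc, hp⟩ := h
  cases a with
  | nil => simp at hc
  | cons y t =>
      have hy : y = c := by simpa using hc
      refine ⟨c, ?_, hp⟩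
      cases l with
      | nil => rw [PySem.Chars.join_singleton]; exact hc
      | cons b r => rw [PySem.Chars.join_cons_cons]; simp [hy]

theorem pv_join_last (sep : List Char) (P : Char → Prop) :
    ∀ (l : List (List Char)) (a : List Char),
      (∀ r ∈ a :: l, ∃ c, r.getLast? = some c ∧ P c) →
      ∃ c, (PySem.Chars.join sep (a :: l)).getLast? = some c ∧ P c := by
  intro l
  induction l with
  | nil =>
      intro a h
      obtain ⟨c, hc, hp⟩ := h a (by simp)
      exact ⟨c, by rw [PySem.Chars.join_singleton]; exact hc, hp⟩
  | cons b r ih =>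
      intro a h
      obtain ⟨c, hc, hp⟩ := ih b (fun q hq => h q (by simp at hq ⊢; tauto))
      refine ⟨c, ?_, hp⟩
      have hne : PySem.Chars.join sep (b :: r) ≠ [] := by
        intro hnil; rw [hnil] at hc; simp at hc
      rw [PySem.Chars.join_cons_cons, List.append_assoc,
        List.getLast?_append_of_ne_nil _
          (fun h0 => hne (List.append_eq_nil_iff.mp h0).2),
        List.getLast?_append_of_ne_nil _ hne]
      exact hc

-- B's row on a nonempty chunk: nonempty with non-space first and last characters
theorem pv_row_head (c : List Int) (h : c ≠ []) :
    ∃ ch, (pvRow c).head? = some ch ∧ PySem.Chars.isspace ch = false := by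
  cases c with
  | nil => exact absurd rfl h
  | cons x t =>
      unfold pvRow
      rw [List.map_cons]
      apply pv_join_head
      cases hx : PySem.Int.toChars x with
      | nil => exact absurd hx (pv_toChars_ne_nil x)
      | cons e s =>
          exact ⟨e, by simp, pv_nonspace_toChars x e (by rw [hx]; simp)⟩

theorem pv_last_toChars (n : Int) :
    ∃ c, (PySem.Int.toChars n).getLast? = some c ∧ PySem.Chars.isspace c = false := by
  obtain ⟨c, hc⟩ := Option.ne_none_iff_exists'.mp
    (mt List.getLast?_eq_none_iff.mp (pv_toChars_ne_nil n))
  exact ⟨c, hc, pv_nonspace_toChars n c (List.mem_of_getLast? hc)⟩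

theorem pv_row_last (c : List Int) (h : c ≠ []) :
    ∃ ch, (pvRow c).getLast? = some ch ∧ PySem.Chars.isspace ch = false := by
  cases c with
  | nil => exact absurd rfl h
  | cons x t =>
      unfold pvRow
      rw [List.map_cons]
      apply pv_join_last
      intro r hr
      rcases List.mem_cons.mp hr with h | h
      · rw [h]; exact pv_last_toChars x
      · obtain ⟨w, hw, hwr⟩ := List.mem_map.mp h
        rw [← hwr]; exact pv_last_toChars w

-- ===== VERDICT (by name: the statement is the Claim_ definition above) =====
theorem get_list_grid_spec : Claim_equal_get_list_grid := by
  intro list size _ hpre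
  show get_list_grid list size = get_list_grid_alt list size
  have hsz : size ≠ 0 := by
    have : (1 : Int) ≤ size := hpre
    omega
  set k : Nat := size.natAbs with hk
  have hk0 : 0 < k := by
    simpa [hk] using Int.natAbs_pos.mpr hsz
  have hks : (k : Int) = size := by
    rw [hk]
    have : (1 : Int) ≤ size := hpre
    omega
  set r : Nat := list.length / k with hr
  set m : Nat := list.length % k with hm
  have hmk : m < k := Nat.mod_lt _ hk0
  have hlen : list.length = r * k + m := by
    have hdm := Nat.div_add_mod list.length k
    rw [hr, hm, mul_comm]
    linarith
  -- A's side: the loop produces the newline-terminated complete rows, then strip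
  have hA : get_list_grid list size
      = String.ofList (PySem.Chars.strip
          ((pvChunks k r list).flatMap (fun c => pvFlat c ++ ['\n']))) := by
    unfold get_list_grid
    rw [pv_mainA size k hk.symm hk0 r m hmk list hlen 0 (dvd_zero size) []]
    simp
  -- B's side: the rows from slices are exactly the rows of the complete chunks
  have hfd : PySem.Int.floordiv (list.length : Int) size = (r : Int) := by
    rw [hr, ← hks]; exact_mod_cast PySem.Int.floordiv_natCast list.length k
  have hchne : ∀ c ∈ pvChunks k r list, c ≠ [] := by
    rw [← pv_chunks_eq k r list]
    intro c hc
    obtain ⟨i, hi, hci⟩ := List.mem_map.mp hc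
    have hi' : i < r := List.mem_range.mp hi
    intro hcnil
    rw [hcnil] at hci
    have hlc := congrArg List.length hci
    simp only [List.length_take, List.length_drop, List.length_nil] at hlc
    have : (i + 1) * k ≤ r * k := Nat.mul_le_mul_right _ (by omega)
    have : i * k + k ≤ r * k := by linarith [this, (by ring : (i + 1) * k = i * k + k)]
    omega
  have hB : get_list_grid_alt list size
      = String.ofList (PySem.Chars.join [' ', '\n'] ((pvChunks k r list).map pvRow)) := by
    unfold get_list_grid_alt
    simp only [PySem.List.len_eq, hfd]
    congr 2
    rw [PySem.List.pyRange_zero_nat r, List.map_map]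
    rw [← pv_chunks_eq k r list, List.map_map]
    apply List.map_congr_left
    intro i _
    simp only [Function.comp_apply, pvRow]
    congr 2
    have hik : ((i : Int) * size) = ((i * k : Nat) : Int) := by push_cast [← hks]; ring
    have hik2 : (((i : Int) + 1) * size) = (((i + 1) * k : Nat) : Int) := by
      push_cast [← hks]; ring
    rw [hik, hik2, PySem.List.slice_natCast]
    congr 1
    have : (i + 1) * k - i * k = k := by ring_nf; omega
    rw [this]
  rw [hA, hB]
  by_cases hcz : pvChunks k r list = []
  · rw [hcz]
    simp [PySem.Chars.join_nil, PySem.Chars.strip, PySem.Chars.lstrip, PySem.Chars.rstrip]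
  · -- rewrite A's concatenation as B's join followed by " \n", then strip it away
    have h1 : (pvChunks k r list).map (fun c => pvFlat c ++ ['\n'])
        = (pvChunks k r list).map (fun c => pvRow c ++ [' ', '\n']) :=
      List.map_congr_left (fun c hc => by
        rw [← pv_row_eq c (hchne c hc)]; simp)
    have hmm : (pvChunks k r list).flatMap (fun c => pvFlat c ++ ['\n'])
        = ((pvChunks k r list).map pvRow).flatMap (fun p => p ++ [' ', '\n']) := by
      rw [List.flatMap_def, h1, ← List.flatMap_def, List.flatMap_map]
    obtain ⟨c1, cs, hcons⟩ := List.exists_cons_of_ne_nil hcz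
    rw [hmm, pv_flat_join [' ', '\n'] _ (by simp [hcons]), pv_strip_sp_nl]
    congr 1
    rw [hcons, List.map_cons]
    apply pv_strip_eq_self
    · exact pv_join_head _ _ _ _ (pv_row_head c1 (hchne c1 (by rw [hcons]; simp)))
    · apply pv_join_last
      intro p hp
      rcases List.mem_cons.mp hp with h | h
      · rw [h]; exact pv_row_last c1 (hchne c1 (by rw [hcons]; simp))
      · obtain ⟨c, hcmem, hcp⟩ := List.mem_map.mp h
        rw [← hcp]; exact pv_row_last c (hchne c (by rw [hcons]; simp [hcmem]))
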